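-- pv_equiv track=rewrite | github.com/Shlobro/P.U.R.E-Skies-Emulator | new.py | split_trash_among_drones
-- ===== SOURCE A (Python) =====
-- import math
--
-- def split_trash_among_drones(trash_points, num_drones, start):
--     """
--     Simple method: sort by distance to 'start' and round-robin.
--     """
--     sorted_pts = sorted(trash_points, key=lambda p: math.hypot(p[0]-start[0], p[1]-start[1]))
--     assignments = [[] for _ in range(num_drones)]
--     idx = 0
--     for pt in sorted_pts:
--         assignments[idx].append(pt)
--         idx = (idx + 1) % num_drones
--     return assignments
-- ===== SOURCE B (Python) =====
-- import math
--
--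
-- def split_trash_among_drones(trash_points, num_drones, start):
--     """
--     Sort by distance to 'start' (same key as A), then gather each drone's
--     share with a strided slice instead of a round-robin counter loop.
--     """
--     sorted_pts = sorted(trash_points, key=lambda p: math.hypot(p[0] - start[0], p[1] - start[1]))
--     return [sorted_pts[i::num_drones] for i in range(num_drones)]
-- ===== Notes on version B (the rewrite author's own statement) =====
-- stated objective: idiomatic
-- what changed: B keeps A's distance sort but replaces the round-robin counter loop (append to assignments[idx], idx=(idx+1)%num_drones) with num_drones independent strided slices sorted_pts[i::num_drones].
import Mathlib
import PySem

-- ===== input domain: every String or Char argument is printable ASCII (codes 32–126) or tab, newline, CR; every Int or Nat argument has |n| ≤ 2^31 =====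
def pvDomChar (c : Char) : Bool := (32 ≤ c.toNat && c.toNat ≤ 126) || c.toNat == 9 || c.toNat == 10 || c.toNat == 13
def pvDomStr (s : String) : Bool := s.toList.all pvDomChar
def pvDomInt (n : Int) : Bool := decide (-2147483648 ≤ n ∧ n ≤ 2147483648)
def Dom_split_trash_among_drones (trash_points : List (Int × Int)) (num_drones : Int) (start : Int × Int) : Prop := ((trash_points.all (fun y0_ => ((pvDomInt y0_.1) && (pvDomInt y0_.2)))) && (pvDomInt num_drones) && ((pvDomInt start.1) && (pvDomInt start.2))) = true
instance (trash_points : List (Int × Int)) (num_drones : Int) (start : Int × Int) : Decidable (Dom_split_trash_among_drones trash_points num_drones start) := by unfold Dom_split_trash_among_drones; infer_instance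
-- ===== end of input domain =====

-- B keeps A's distance sort but gathers each drone's share with strided slices
-- sorted_pts[i::num_drones] instead of A's round-robin modulo-counter loop (idiomatic decomposition).


-- Shared sort key: Python sorts by math.hypot(dx, dy); the ports use the squared
-- distance dx*dx + dy*dy, which induces the same order whenever distinct squared
-- distances are not almost equal — Pre_ restricts to exactly that (see below).
def pvSq (start : Int × Int) (p : Int × Int) : Int :=
  (p.1 - start.1) * (p.1 - start.1) + (p.2 - start.2) * (p.2 - start.2)

-- ===== PORT A =====
def split_trash_among_drones (trash_points : List (Int × Int)) (num_drones : Int) (start : Int × Int) : List (List (Int × Int)) :=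
  let sorted_pts := PySem.List.sorted trash_points (fun p => pvSq start p)
  let assignments : List (List (Int × Int)) := (PySem.List.pyRange 0 num_drones 1).map (fun _ => [])
  -- loop state: (assignments, idx); assignments[idx].append(pt); idx = (idx+1) % num_drones
  -- (idx is always 0 ≤ idx < num_drones under Pre_; Python's IndexError for
  --  num_drones <= 0 with points present is excluded by Pre_)
  (sorted_pts.foldl
    (fun (st : List (List (Int × Int)) × Int) pt =>
      (st.1.modify st.2.toNat (fun q => q ++ [pt]), PySem.Int.mod (st.2 + 1) num_drones))
    (assignments, 0)).1

-- ===== PORT B =====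
def split_trash_among_drones_alt (trash_points : List (Int × Int)) (num_drones : Int) (start : Int × Int) : List (List (Int × Int)) :=
  let sorted_pts := PySem.List.sorted trash_points (fun p => pvSq start p)
  (PySem.List.pyRange 0 num_drones 1).map
    (fun i => (PySem.List.slice? sorted_pts (some i) none num_drones).getD [])

-- ===== PRECONDITION & SPEC =====
-- Pre_ excludes (a) inputs where A raises IndexError (num_drones <= 0 with a non-empty
-- list), and (b) lists containing two points whose squared distances to start are
-- distinct yet relatively closer than 2^-49: there float math.hypot may round them to
-- the same double and the resulting stable-sort order is a rounding artefact the
-- integer-key ports cannot reproduce (A and B, both sorting by the same hypot key,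
-- still agree with each other on such inputs).
def Pre_split_trash_among_drones (trash_points : List (Int × Int)) (num_drones : Int) (start : Int × Int) : Prop :=
  (0 < num_drones ∨ trash_points = []) ∧
  ∀ p ∈ trash_points, ∀ q ∈ trash_points,
    pvSq start p = pvSq start q ∨
    max (pvSq start p) (pvSq start q) < ((pvSq start p - pvSq start q).natAbs : Int) * 562949953421312
instance (trash_points : List (Int × Int)) (num_drones : Int) (start : Int × Int) : Decidable (Pre_split_trash_among_drones trash_points num_drones start) := by unfold Pre_split_trash_among_drones; infer_instance

def pvWitness_split_trash_among_drones : (List (Int × Int)) × Int × (Int × Int) :=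
  ([(0, 1), (3, 4), (1, 0)], 2, (0, 0))

def Spec_split_trash_among_drones (trash_points : List (Int × Int)) (num_drones : Int) (start : Int × Int) (out : List (List (Int × Int))) : Prop := out = split_trash_among_drones_alt trash_points num_drones start
instance (trash_points : List (Int × Int)) (num_drones : Int) (start : Int × Int) (out : List (List (Int × Int))) : Decidable (Spec_split_trash_among_drones trash_points num_drones start out) := by unfold Spec_split_trash_among_drones; infer_instance

-- ===== CLAIM (what is proved, stated in full; the proofs are below) =====
def Claim_equal_split_trash_among_drones : Prop := ∀ (trash_points : List (Int × Int)) (num_drones : Int) (start : Int × Int), Dom_split_trash_among_drones trash_points num_drones start → Pre_split_trash_among_drones trash_points num_drones start → Spec_split_trash_among_drones trash_points num_drones start (split_trash_among_drones trash_points num_drones start)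
-- ===== LEMMAS AND PROOFS =====

theorem pv_mapIdx_id {α : Type} (A : List α) : List.mapIdx (fun _ a => a) A = A := by
  induction A with
  | nil => rfl
  | cons x xs ih => rw [List.mapIdx_cons]; simp_all

-- pvG l m k: the elements of l whose index is ≡ m (mod k), m < k (the m-th round-robin bucket).
def pvG {α : Type} (l : List α) (m k : Nat) : List α :=
  match l with
  | [] => []
  | x :: xs => if m = 0 then x :: pvG xs (k - 1) k else pvG xs (m - 1) k

theorem pvG_nil_of_le {α : Type} (l : List α) (m k : Nat) (h : l.length ≤ m) : pvG l m k = [] := by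
  induction l generalizing m with
  | nil => rfl
  | cons x xs ih =>
    simp only [List.length_cons] at h
    have hm : m ≠ 0 := by omega
    simp [pvG, hm, ih (m - 1) (by omega)]

theorem pv_filterMap_stride {α : Type} (l : List α) (i k : Nat) (hk : 0 < k) :
    (List.range ((l.length - i + k - 1) / k)).filterMap (fun j => l[i + k * j]?) = pvG l i k := by
  induction l generalizing i with
  | nil =>
    simp [pvG]
  | cons x xs ih =>
    cases i with
    | zero =>
      have hc : (x :: xs).length - 0 + k - 1 = xs.length + k := by
        simp only [List.length_cons]; omega
      rw [hc, Nat.add_div_right _ hk, List.range_succ_eq_map, List.filterMap_cons,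
        List.filterMap_map]
      have h0 : (x :: xs)[0 + k * 0]? = some x := by simp
      rw [h0]
      have harg : (fun j => (x :: xs)[0 + k * (j + 1)]?) = (fun j => xs[(k - 1) + k * j]?) := by
        funext j
        have : 0 + k * (j + 1) = ((k - 1) + k * j) + 1 := by rw [Nat.mul_succ]; omega
        rw [this, List.getElem?_cons_succ]
      have hcnt : xs.length / k = (xs.length - (k - 1) + k - 1) / k := by
        by_cases h : k - 1 ≤ xs.length
        · congr 1; omega
        · rw [Nat.div_eq_of_lt (by omega), Nat.div_eq_of_lt (by omega)]
      simp only [Function.comp_def, harg]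
      rw [hcnt, ih (k - 1)]
      simp [pvG]
    | succ m =>
      have hc : (x :: xs).length - (m + 1) + k - 1 = xs.length - m + k - 1 := by
        simp only [List.length_cons]; omega
      have harg : (fun j => (x :: xs)[(m + 1) + k * j]?) = (fun j => xs[m + k * j]?) := by
        funext j
        have : (m + 1) + k * j = (m + k * j) + 1 := by omega
        rw [this, List.getElem?_cons_succ]
      rw [hc, harg, ih m]
      simp [pvG]

theorem pv_slice_eq_pvG {α : Type} (l : List α) (i k : Nat) (hk : 0 < k) :
    (PySem.List.slice? l (some (i : Int)) none (k : Int)).getD [] = pvG l i k := by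
  have hk0 : (k : Int) ≠ 0 := by exact_mod_cast hk.ne'
  have hkneg : ¬ ((k : Int) < 0) := by exact_mod_cast Int.not_lt.mpr (Int.natCast_nonneg k)
  have hkpos : (0 : Int) < (k : Int) := by exact_mod_cast hk
  simp only [PySem.List.slice?, PySem.List.sliceIndices, if_neg hk0, hkneg, if_false,
    Int.natCast_nonneg, not_lt.mpr (Int.natCast_nonneg i), if_neg (not_lt.mpr (Int.natCast_nonneg i))]
  by_cases hi : i ≤ l.length
  · have hmin : min (i : Int) (l.length : Int) = (i : Int) := by
      exact min_eq_left (by exact_mod_cast hi)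
    rw [hmin, if_pos hkpos]
    by_cases hlt : i < l.length
    · have hltI : ((i : Int) < (l.length : Int)) := by exact_mod_cast hlt
      rw [if_pos hltI]
      have hcast : ((l.length : Int) - i + k - 1) = ((l.length - i + k - 1 : Nat) : Int) := by
        push_cast; omega
      have hcnt : (((l.length : Int) - i + k - 1) / k).toNat = (l.length - i + k - 1) / k := by
        rw [hcast, ← Int.natCast_div, Int.toNat_natCast]
      rw [hcnt]
      have harg : (fun j : Nat => l[((i : Int) + k * j).toNat]?) = (fun j : Nat => l[i + k * j]?) := by
        funext j
        have hx : ((i : Int) + k * j) = ((i + k * j : Nat) : Int) := by push_cast; ring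
        rw [hx, Int.toNat_natCast]
      rw [harg, pv_filterMap_stride l i k hk]
      rfl
    · have hieq : i = l.length := by omega
      have hltI : ¬ ((i : Int) < (l.length : Int)) := by exact_mod_cast hlt
      rw [if_neg hltI]
      simp [pvG_nil_of_le l i k (by omega)]
  · have hmin : min (i : Int) (l.length : Int) = (l.length : Int) := by
      exact min_eq_right (by exact_mod_cast (le_of_lt (Nat.lt_of_not_le hi)))
    rw [hmin, if_pos hkpos]
    simp [pvG_nil_of_le l i k (by omega)]

-- Round-robin loop invariant: bucket j of the final assignments is A[j] ++ (the elements of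
-- l whose position is ≡ j - idx (mod k)), for k = A.length.
theorem pv_loop_spec (l : List (Int × Int)) (A : List (List (Int × Int))) (idx nd : Int)
    (h0 : 0 ≤ idx) (h1 : idx < nd) (hA : A.length = nd.toNat) :
    (l.foldl
      (fun (st : List (List (Int × Int)) × Int) pt =>
        (st.1.modify st.2.toNat (fun q => q ++ [pt]), PySem.Int.mod (st.2 + 1) nd))
      (A, idx)).1
    = A.mapIdx (fun j a => a ++ pvG l ((j + A.length - idx.toNat) % A.length) A.length) := by
  induction l generalizing A idx with
  | nil =>
    simp only [List.foldl_nil, pvG, List.append_nil]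
    exact (pv_mapIdx_id A).symm
  | cons x xs ih =>
    have hnd : 0 < nd := lt_of_le_of_lt h0 h1
    have hk1 : 1 ≤ A.length := by omega
    have hi : idx.toNat < A.length := by omega
    rw [List.foldl_cons]
    rw [ih (A.modify idx.toNat (fun q => q ++ [x])) (PySem.Int.mod (idx + 1) nd)
      (PySem.Int.mod_nonneg _ hnd) (PySem.Int.mod_lt _ hnd)
      (by rw [List.length_modify]; exact hA)]
    have hstep : (PySem.Int.mod (idx + 1) nd).toNat = (idx.toNat + 1) % A.length := by
      rw [PySem.Int.mod_eq_emod_of_pos hnd]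
      have e1 : idx + 1 = ((idx.toNat + 1 : Nat) : Int) := by omega
      have e2 : nd = ((nd.toNat : Nat) : Int) := by omega
      rw [e1, e2, ← Int.natCast_emod, Int.toNat_natCast, hA]
    apply List.ext_getElem
    · simp
    · intro j hj1 hj2
      have hj : j < A.length := by simpa using hj1
      have hmod : (A.modify idx.toNat (fun q => q ++ [x]))[j]'(by
          rw [List.length_modify]; exact hj) =
          if idx.toNat = j then A[j]'hj ++ [x] else A[j]'hj := List.getElem_modify ..
      simp only [List.getElem_mapIdx, List.length_modify, hstep, hmod]
      set k := A.length with hkdef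
      set i := idx.toNat with hidef
      by_cases hji : i = j
      · subst hji
        rw [if_pos rfl]
        have hm0 : (i + k - i) % k = 0 := by
          have : i + k - i = k := by omega
          rw [this, Nat.mod_self]
        have hm1 : (i + k - (i + 1) % k) % k = k - 1 := by
          by_cases h2 : i + 1 < k
          · rw [Nat.mod_eq_of_lt h2]
            have : i + k - (i + 1) = k - 1 := by omega
            rw [this, Nat.mod_eq_of_lt (by omega)]
          · have hik : i + 1 = k := by omega
            rw [hik, Nat.mod_self]
            have : i + k - 0 = i + k := by omega
            rw [this, Nat.add_mod_right, Nat.mod_eq_of_lt hi]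
            omega
        rw [hm0, hm1]
        simp only [pvG, if_pos rfl, List.append_assoc, List.singleton_append]
        rfl
      · rw [if_neg hji]
        have hmne : (j + k - i) % k ≠ 0 ∧ (j + k - (i + 1) % k) % k = (j + k - i) % k - 1 := by
          by_cases hij : i < j
          · have hm : (j + k - i) % k = j - i := by
              have : j + k - i = k + (j - i) := by omega
              rw [this, Nat.add_mod_left, Nat.mod_eq_of_lt (by omega)]
            by_cases h2 : i + 1 < k
            · have hm' : (j + k - (i + 1) % k) % k = j - i - 1 := by
                rw [Nat.mod_eq_of_lt h2]
                have : j + k - (i + 1) = k + (j - i - 1) := by omega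
                rw [this, Nat.add_mod_left, Nat.mod_eq_of_lt (by omega)]
              rw [hm, hm']
              omega
            · omega
          · have hji' : j < i := by omega
            have hm : (j + k - i) % k = j + k - i := Nat.mod_eq_of_lt (by omega)
            by_cases h2 : i + 1 < k
            · have hm' : (j + k - (i + 1) % k) % k = j + k - i - 1 := by
                rw [Nat.mod_eq_of_lt h2]
                have h3 : j + k - (i + 1) = j + k - i - 1 := by omega
                rw [h3, Nat.mod_eq_of_lt (by omega)]
              rw [hm, hm']
              omega
            · have hik : i + 1 = k := by omega
              have hm' : (j + k - (i + 1) % k) % k = j := by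
                rw [hik, Nat.mod_self]
                have : j + k - 0 = j + k := by omega
                rw [this, Nat.add_mod_right, Nat.mod_eq_of_lt hj]
              rw [hm, hm']
              omega
        obtain ⟨hmne0, hmeq⟩ := hmne
        rw [hmeq]
        conv_rhs => rw [pvG]
        rw [if_neg hmne0]

-- ===== VERDICT (by name: the statement is the Claim_ definition above) =====
theorem split_trash_among_drones_spec : Claim_equal_split_trash_among_drones := by
  unfold Claim_equal_split_trash_among_drones
  intro tp nd st _ hpre
  unfold Spec_split_trash_among_drones
  unfold split_trash_among_drones split_trash_among_drones_alt
  dsimp only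
  by_cases hnd : 0 < nd
  · have hlen : ((PySem.List.pyRange 0 nd 1).map
        (fun _ => ([] : List (Int × Int)))).length = nd.toNat := by
      rw [List.length_map, PySem.List.length_pyRange_one]
      omega
    rw [pv_loop_spec _ _ 0 nd le_rfl hnd hlen]
    apply List.ext_getElem
    · simp [PySem.List.length_pyRange_one]
    · intro j hj1 hj2
      have hjr : j < (PySem.List.pyRange 0 nd 1).length := by
        simpa using hj2
      have hj : j < nd.toNat := by
        rw [PySem.List.length_pyRange_one] at hjr
        omega
      rw [List.getElem_mapIdx]
      conv_rhs => rw [List.getElem_map]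
      have hinit : ((PySem.List.pyRange 0 nd 1).map
          (fun _ => ([] : List (Int × Int))))[j]'(by rwa [hlen]) = [] := by
        rw [List.getElem_map]
      have hmodv : (j + ((PySem.List.pyRange 0 nd 1).map
          (fun _ => ([] : List (Int × Int)))).length - (0 : Int).toNat) %
          ((PySem.List.pyRange 0 nd 1).map (fun _ => ([] : List (Int × Int)))).length
          = j := by
        rw [hlen]
        have : j + nd.toNat - (0 : Int).toNat = j + nd.toNat := by omega
        rw [this, Nat.add_mod_right, Nat.mod_eq_of_lt hj]
      rw [hinit, hmodv, List.nil_append, hlen]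
      have hr : (PySem.List.pyRange 0 nd 1)[j]'hjr = (j : Int) := by
        rw [PySem.List.getElem_pyRange_one]
        omega
      rw [hr]
      have hndc : (nd.toNat : Int) = nd := Int.toNat_of_nonneg (by omega)
      rw [← hndc, pv_slice_eq_pvG _ j nd.toNat (by omega), Int.toNat_natCast]
  · have htp : tp = [] := by
      rcases hpre.1 with h | h
      · omega
      · exact h
    subst htp
    rw [PySem.List.pyRange_one_eq_nil (by omega)]
    simp [PySem.List.sorted]
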